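-- pv_equiv track=rewrite | github.com/981377660LMT/algorithm-study | 22_专题/前缀与差分/前缀和子数组/325_和等于k的最短子数组长度-Remove Sublist to Reach Equilibrium.py | solve
-- ===== SOURCE A (Python) =====
-- from itertools import accumulate
-- from typing import List
--
-- def solve(nums: List[int], k: int) -> int:
--     n = len(nums)
--     nums = [int(n > k) - int(n < k) for n in nums]
--     sum_ = sum(nums)
--
--     res = int(1e20)
--     last = {0: 0}
--     # 最短子数组可以不选，所以要从0开始
--     preSum = [0] + list(accumulate(nums))
--     for i, cur in enumerate(preSum):
--         if cur - sum_ in last: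
--             res = min(res, i - last[cur - sum_])
--         last[cur] = i
--
--     return n - res
-- ===== SOURCE B (Python) =====
-- def solve(nums, k):
--     arr = [(x > k) - (x < k) for x in nums]
--     total = sum(arr)
--     n = len(arr)
--     best = 0 if total == 0 else int(1e20)
--     for i in range(n):
--         s = 0
--         for j in range(i, n):
--             s += arr[j]
--             if s == total:
--                 best = min(best, j + 1 - i)
--     return n - best
-- ===== Notes on version B (the rewrite author's own statement) =====
-- stated objective: simpler
-- what changed: replaced the prefix-sum/hashmap single pass by a plain brute-force scan over all subarray start/end pairs with an incrementally accumulated inner sum (empty subarray handled by the initial best when total==0)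
import Mathlib
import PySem

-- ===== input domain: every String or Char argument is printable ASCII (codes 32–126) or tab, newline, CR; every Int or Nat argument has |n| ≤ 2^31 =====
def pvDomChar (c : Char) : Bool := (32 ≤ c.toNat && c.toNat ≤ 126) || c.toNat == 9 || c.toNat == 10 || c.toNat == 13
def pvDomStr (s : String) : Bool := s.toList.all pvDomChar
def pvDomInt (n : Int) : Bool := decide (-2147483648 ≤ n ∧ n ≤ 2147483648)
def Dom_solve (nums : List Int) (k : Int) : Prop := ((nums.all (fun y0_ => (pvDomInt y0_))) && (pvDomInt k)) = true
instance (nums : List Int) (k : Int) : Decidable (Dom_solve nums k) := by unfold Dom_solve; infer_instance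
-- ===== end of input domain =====

-- B replaces A's prefix-sum/hashmap single pass by a plain brute-force scan over all
-- subarray start/end pairs with a running inner sum (objective: simpler, not faster).

-- ===== PORT A =====
-- itertools.accumulate(l) with running value acc (exact: running sums, no initial element)
def pyAccumulate (acc : Int) : List Int → List Int
  | [] => []
  | x :: xs => (acc + x) :: pyAccumulate (acc + x) xs

def solve (nums : List Int) (k : Int) : Int :=
  let n : Int := nums.length
  let arr := nums.map (fun x => (if x > k then (1 : Int) else 0) - (if x < k then 1 else 0))
  let sum_ := arr.sum
  -- res = int(1e20); last = {0: 0}; preSum = [0] + list(accumulate(arr))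
  let preSum : List Int := 0 :: pyAccumulate 0 arr
  -- state (res, last, i); enumerate ported as the fold carrying i
  let st := preSum.foldl
    (fun (st : Int × PySem.Dict Int Int × Int) cur =>
      (match st.2.1.get? (cur - sum_) with
       | some j => min st.1 (st.2.2 - j)
       | none => st.1,
       st.2.1.insert cur st.2.2, st.2.2 + 1))
    ((100000000000000000000 : Int), PySem.Dict.ofList [((0 : Int), (0 : Int))], (0 : Int))
  n - st.1

-- ===== PORT B =====
def solve_alt (nums : List Int) (k : Int) : Int :=
  let arr := nums.map (fun x => (if x > k then (1 : Int) else 0) - (if x < k then 1 else 0))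
  let total := arr.sum
  let n : Int := arr.length
  let best : Int := if total = 0 then 0 else 100000000000000000000
  let best := (PySem.List.pyRange 0 n 1).foldl
    (fun best i =>
      ((PySem.List.pyRange i n 1).foldl
        (fun (p : Int × Int) j =>
          let s := p.1 + PySem.List.pyGetD arr j 0   -- arr[j]: 0 ≤ i ≤ j < n, always in range
          (s, if s = total then min p.2 (j + 1 - i) else p.2))
        (0, best)).2)
    best
  n - best

-- ===== PRECONDITION & SPEC =====
def Spec_solve (nums : List Int) (k : Int) (out : Int) : Prop := out = solve_alt nums k
instance (nums : List Int) (k : Int) (out : Int) : Decidable (Spec_solve nums k out) := by unfold Spec_solve; infer_instance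

-- ===== CLAIM (what is proved, stated in full; the proofs are below) =====
def Claim_equal_solve : Prop := ∀ (nums : List Int) (k : Int), Dom_solve nums k → Spec_solve nums k (solve nums k)


-- ===== LEMMAS AND PROOFS =====

-- prefix sum of the ±1 array: preS arr i = sum of the first i elements
def preS (arr : List Int) (i : Nat) : Int := (arr.take i).sum

-- the largest index j < i with preS arr j = v (A's `last` dict, mathematically)
def lastIdx (arr : List Int) : Nat → Int → Option Nat
  | 0, _ => none
  | i + 1, v => if preS arr i = v then some i else lastIdx arr i v

-- A's candidate at step i (the seed {0:0} makes step 0 behave like step 1's dict)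
def fA (arr : List Int) (t : Int) (i : Nat) : Option Int :=
  (lastIdx arr (max i 1) (preS arr i - t)).map (fun j => (i : Int) - (j : Int))

def candsA (arr : List Int) (t : Int) (n : Nat) : List Int :=
  (List.range (n + 1)).filterMap (fA arr t)

-- B's candidate for the subarray arr[i..j]
def fB (arr : List Int) (t : Int) (i j : Nat) : Option Int :=
  if preS arr (j + 1) - preS arr i = t then some ((j : Int) + 1 - (i : Int)) else none

def candsB (arr : List Int) (t : Int) (n : Nat) : List Int :=
  (List.range n).flatMap (fun i => (List.range' i (n - i)).filterMap (fB arr t i))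

theorem le_foldl_min (l : List Int) (b a : Int) (h : a ≤ b) (h2 : ∀ x ∈ l, a ≤ x) :
    a ≤ l.foldl min b := by
  induction l generalizing b with
  | nil => exact h
  | cons x xs ih =>
    exact ih _ (le_min h (h2 x (by simp))) (fun y hy => h2 y (by simp [hy]))

theorem foldl_min_flatMap (g : Nat → List Int) (l : List Nat) (b : Int) :
    l.foldl (fun r i => (g i).foldl min r) b = (l.flatMap g).foldl min b := by
  induction l generalizing b with
  | nil => rfl
  | cons x xs ih => simp [List.flatMap_cons, List.foldl_append, ih]

theorem pyAccumulate_eq (l : List Int) (a : Int) :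
    pyAccumulate a l = (List.range l.length).map (fun i => a + (l.take (i + 1)).sum) := by
  induction l generalizing a with
  | nil => rfl
  | cons x xs ih =>
    simp only [pyAccumulate, List.length_cons, List.range_succ_eq_map, List.map_cons,
      List.map_map]
    congr 1
    · simp
    · rw [ih (a + x)]
      refine List.map_congr_left (fun i _ => ?_)
      simp [List.sum_cons, Function.comp]
      ring

theorem preS_succ (arr : List Int) (j : Nat) (hj : j < arr.length) :
    preS arr (j + 1) = preS arr j + arr.getD j 0 := by
  simp only [preS, List.take_add_one, List.sum_append, List.getElem?_eq_getElem hj]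
  simp [List.getD_eq_getElem?_getD, List.getElem?_eq_getElem hj]

theorem lastIdx_some (arr : List Int) (i : Nat) (v : Int) (j : Nat)
    (h : lastIdx arr i v = some j) : j < i ∧ preS arr j = v := by
  induction i with
  | zero => simp [lastIdx] at h
  | succ m ih =>
    by_cases hm : preS arr m = v
    · simp only [lastIdx, if_pos hm, Option.some.injEq] at h
      exact ⟨by omega, h ▸ hm⟩
    · simp only [lastIdx, if_neg hm] at h
      obtain ⟨h1, h2⟩ := ih h
      exact ⟨Nat.lt_succ_of_lt h1, h2⟩

theorem lastIdx_exists (arr : List Int) (i : Nat) (v : Int) (j : Nat)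
    (hj : j < i) (hv : preS arr j = v) : ∃ j', lastIdx arr i v = some j' ∧ j ≤ j' := by
  induction i with
  | zero => omega
  | succ m ih =>
    by_cases hm : preS arr m = v
    · exact ⟨m, by simp [lastIdx, hm], by omega⟩
    · have hjm : j < m := by
        rcases Nat.lt_succ_iff_lt_or_eq.mp hj with h | h
        · exact h
        · exact absurd (h ▸ hv) hm
      obtain ⟨j', h1, h2⟩ := ih hjm
      exact ⟨j', by simp [lastIdx, hm, h1], h2⟩

-- the dict invariant carried through A's loop
def DInv (arr : List Int) (start : Nat) (d : PySem.Dict Int Int) : Prop :=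
  ∀ v, d.get? v = (lastIdx arr (max start 1) v).map (fun j => ((j : Nat) : Int))

theorem preS_zero (arr : List Int) : preS arr 0 = 0 := rfl

theorem DInv_insert (arr : List Int) (start : Nat) (d : PySem.Dict Int Int)
    (hd : DInv arr start d) :
    DInv arr (start + 1) (d.insert (preS arr start) (start : Int)) := by
  intro v
  rw [PySem.Dict.get?_insert]
  have hmax : max (start + 1) 1 = start + 1 := by omega
  rw [hmax]
  by_cases hv : v = preS arr start
  · subst hv
    simp [lastIdx]
  · rw [if_neg hv]
    have hne : ¬ preS arr start = v := fun h => hv h.symm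
    have : lastIdx arr (start + 1) v = lastIdx arr start v := by
      simp [lastIdx, hne]
    rw [this, hd v]
    match start with
    | 0 => simp [lastIdx, hne]
    | s + 1 =>
      have h1 : max (s + 1) 1 = s + 1 := by omega
      rw [h1]

theorem DInv_seed (arr : List Int) :
    DInv arr 0 (PySem.Dict.ofList [((0 : Int), (0 : Int))]) := by
  intro v
  by_cases hv : v = 0
  · subst hv
    have h : lastIdx arr (max 0 1) 0 = some 0 := by simp [lastIdx, preS_zero]
    rw [h]
    simp [PySem.Dict.ofList, PySem.Dict.update]
  · have h : lastIdx arr (max 0 1) v = none := by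
      simp [lastIdx, preS_zero]
      exact fun h => hv h.symm
    rw [h]
    simp [PySem.Dict.ofList, PySem.Dict.update, PySem.Dict.get?_insert, hv,
      PySem.Dict.get?_empty]

theorem aloop_eq (arr : List Int) (t : Int) (m start : Nat) (res : Int)
    (d : PySem.Dict Int Int) (hd : DInv arr start d) :
    ((List.range' start m).foldl
      (fun (st : Int × PySem.Dict Int Int × Int) (i : Nat) =>
        (match st.2.1.get? (preS arr i - t) with
         | some j => min st.1 (st.2.2 - j)
         | none => st.1,
         st.2.1.insert (preS arr i) st.2.2, st.2.2 + 1))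
      (res, d, (start : Int))).1
    = ((List.range' start m).filterMap (fA arr t)).foldl min res := by
  induction m generalizing start res d with
  | zero => rfl
  | succ m ih =>
    rw [List.range'_succ, List.foldl_cons, List.filterMap_cons]
    have hget := hd (preS arr start - t)
    have hins := DInv_insert arr start d hd
    have hcast : (start : Int) + 1 = ((start + 1 : Nat) : Int) := by push_cast; ring
    cases ho : lastIdx arr (max start 1) (preS arr start - t) with
    | none =>
      rw [ho] at hget
      simp only [hget, Option.map_none, fA, ho, Option.map_none]
      rw [hcast]
      exact ih (start + 1) res _ hins
    | some j =>
      rw [ho] at hget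
      simp only [hget, Option.map_some, fA, ho]
      rw [hcast]
      exact ih (start + 1) (min res ((start : Int) - (j : Int))) _ hins

theorem preSum_eq (arr : List Int) :
    0 :: pyAccumulate 0 arr = (List.range' 0 (arr.length + 1)).map (preS arr) := by
  rw [← List.range_eq_range', List.range_succ_eq_map, List.map_cons, List.map_map]
  congr 1
  rw [pyAccumulate_eq]
  refine List.map_congr_left (fun i _ => ?_)
  simp [preS, Function.comp]

theorem solve_eq_candsA (nums : List Int) (k : Int) :
    solve nums k
      = (nums.length : Int)
        - (candsA (nums.map (fun x => (if x > k then (1 : Int) else 0) - (if x < k then 1 else 0)))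
            ((nums.map (fun x => (if x > k then (1 : Int) else 0) - (if x < k then 1 else 0))).sum)
            nums.length).foldl min 100000000000000000000 := by
  unfold solve
  dsimp only
  rw [preSum_eq, List.foldl_map]
  have := aloop_eq
    (nums.map (fun x => (if x > k then (1 : Int) else 0) - (if x < k then 1 else 0)))
    ((nums.map (fun x => (if x > k then (1 : Int) else 0) - (if x < k then 1 else 0))).sum)
    ((nums.map (fun x => (if x > k then (1 : Int) else 0) - (if x < k then 1 else 0))).length + 1)
    0 100000000000000000000 (PySem.Dict.ofList [((0 : Int), (0 : Int))]) (DInv_seed _)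
  rw [show ((0 : Nat) : Int) = (0 : Int) from rfl] at this
  rw [this]
  rw [candsA, List.range_eq_range']
  simp

theorem innerB (arr : List Int) (t : Int) (c j0 i : Nat) (b s : Int)
    (hend : j0 + c = arr.length) (hs : s = preS arr j0 - preS arr i) :
    ((PySem.List.pyRange (j0 : Int) (arr.length : Int) 1).foldl
      (fun (p : Int × Int) j =>
        (p.1 + PySem.List.pyGetD arr j 0,
         if p.1 + PySem.List.pyGetD arr j 0 = t then min p.2 (j + 1 - (i : Int)) else p.2))
      (s, b)).2
    = ((List.range' j0 c).filterMap (fB arr t i)).foldl min b := by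
  induction c generalizing j0 b s with
  | zero =>
    have h0 : ((arr.length : Int) - (j0 : Int)).toNat = 0 := by omega
    rw [PySem.List.pyRange_one, h0]
    rfl
  | succ c ih =>
    have hlt : (j0 : Int) < (arr.length : Int) := by exact_mod_cast (by omega : j0 < arr.length)
    rw [PySem.List.pyRange_one_cons hlt, List.foldl_cons, List.range'_succ, List.filterMap_cons]
    have hget : PySem.List.pyGetD arr (j0 : Int) 0 = arr.getD j0 0 :=
      PySem.List.pyGetD_natCast arr j0 0
    have hsum : s + PySem.List.pyGetD arr (j0 : Int) 0 = preS arr (j0 + 1) - preS arr i := by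
      rw [hget, hs, preS_succ arr j0 (by omega)]; ring
    have hcast : (j0 : Int) + 1 = ((j0 + 1 : Nat) : Int) := by push_cast; ring
    dsimp only
    rw [hsum, fB]
    by_cases hc : preS arr (j0 + 1) - preS arr i = t
    · rw [if_pos hc, if_pos hc, List.foldl_cons, hcast]
      exact ih (j0 + 1) _ _ (by omega) rfl
    · rw [if_neg hc, if_neg hc, hcast]
      exact ih (j0 + 1) b (preS arr (j0 + 1) - preS arr i) (by omega) rfl

theorem solve_alt_eq_candsB (nums : List Int) (k : Int) :
    solve_alt nums k
      = (nums.length : Int)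
        - (candsB (nums.map (fun x => (if x > k then (1 : Int) else 0) - (if x < k then 1 else 0)))
            ((nums.map (fun x => (if x > k then (1 : Int) else 0) - (if x < k then 1 else 0))).sum)
            nums.length).foldl min
            (if (nums.map (fun x => (if x > k then (1 : Int) else 0) - (if x < k then 1 else 0))).sum = 0
             then 0 else 100000000000000000000) := by
  unfold solve_alt
  dsimp only
  rw [PySem.List.pyRange_zero_natCast, List.foldl_map]
  simp only [List.length_map]
  congr 1
  unfold candsB
  rw [← foldl_min_flatMap]
  refine PySem.List.foldl_congr_mem _ _ _ _ (fun b i hi => ?_)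
  have hi' : i < nums.length := by
    simpa [List.mem_range] using hi
  have hlen : (nums.map (fun x => (if x > k then (1 : Int) else 0) - (if x < k then 1 else 0))).length
      = nums.length := by simp
  rw [show ((nums.length : Nat) : Int)
      = ((nums.map (fun x => (if x > k then (1 : Int) else 0) - (if x < k then 1 else 0))).length : Int)
      from by rw [hlen]]
  rw [innerB _ _ (nums.length - i) i i b 0 (by omega) (by simp)]

theorem cands_min_eq (arr : List Int) (t : Int) (n : Nat) :
    (candsA arr t n).foldl min 100000000000000000000
      = (candsB arr t n).foldl min (if t = 0 then 0 else 100000000000000000000) := by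
  apply le_antisymm
  · apply le_foldl_min
    · by_cases ht : t = 0
      · rw [if_pos ht]
        have hfa : fA arr t 0 = some 0 := by
          simp [fA, ht, preS_zero, lastIdx]
        have hmem : (0 : Int) ∈ candsA arr t n :=
          List.mem_filterMap.mpr ⟨0, by simp, hfa⟩
        exact (PySem.List.foldl_min_le _ _).2 0 hmem
      · rw [if_neg ht]
        exact (PySem.List.foldl_min_le _ _).1
    · intro x hx
      unfold candsB at hx
      obtain ⟨i, hi, hx⟩ := List.mem_flatMap.mp hx
      obtain ⟨j, hj, hfb⟩ := List.mem_filterMap.mp hx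
      rw [List.mem_range] at hi
      rw [List.mem_range'_1] at hj
      rw [fB] at hfb
      by_cases hc : preS arr (j + 1) - preS arr i = t
      · rw [if_pos hc, Option.some.injEq] at hfb
        have hpi : preS arr i = preS arr (j + 1) - t := by omega
        obtain ⟨j', hj'1, hj'2⟩ :=
          lastIdx_exists arr (j + 1) (preS arr (j + 1) - t) i (by omega) hpi
        have hfa : fA arr t (j + 1) = some (((j + 1 : Nat) : Int) - (j' : Int)) := by
          rw [fA, show max (j + 1) 1 = j + 1 from by omega, hj'1]
          rfl
        have hmem : (((j + 1 : Nat) : Int) - (j' : Int)) ∈ candsA arr t n :=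
          List.mem_filterMap.mpr ⟨j + 1, List.mem_range.mpr (by omega), hfa⟩
        refine le_trans ((PySem.List.foldl_min_le _ _).2 _ hmem) ?_
        rw [← hfb]
        push_cast
        omega
      · rw [if_neg hc] at hfb
        exact absurd hfb (by simp)
  · apply le_foldl_min
    · refine le_trans (PySem.List.foldl_min_le _ _).1 ?_
      split_ifs <;> norm_num
    · intro x hx
      unfold candsA at hx
      obtain ⟨i, hi, hfa⟩ := List.mem_filterMap.mp hx
      rw [List.mem_range] at hi
      rw [fA] at hfa
      cases ho : lastIdx arr (max i 1) (preS arr i - t) with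
      | none => rw [ho] at hfa; exact absurd hfa (by simp)
      | some j' =>
        rw [ho] at hfa
        have hfa : (i : Int) - (j' : Int) = x := by
          rw [← Option.some.injEq]
          exact hfa.symm ▸ rfl
        match i, hi, hfa, ho with
        | 0, hi, hfa, ho =>
          obtain ⟨h1, h2⟩ := lastIdx_some arr (max 0 1) _ j' ho
          have hj0 : j' = 0 := by omega
          subst hj0
          rw [preS_zero] at h2
          have ht : t = 0 := by omega
          have hx0 : x = 0 := by rw [← hfa]; simp
          rw [hx0, ht, if_pos rfl]
          exact (PySem.List.foldl_min_le _ _).1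
        | s + 1, hi, hfa, ho =>
          rw [show max (s + 1) 1 = s + 1 from by omega] at ho
          obtain ⟨hj1, hj2⟩ := lastIdx_some arr (s + 1) _ j' ho
          have hfb : fB arr t j' s = some ((s : Int) + 1 - (j' : Int)) := by
            rw [fB, if_pos (by omega)]
          have hmem : ((s : Int) + 1 - (j' : Int)) ∈ candsB arr t n := by
            unfold candsB
            refine List.mem_flatMap.mpr ⟨j', List.mem_range.mpr (by omega), ?_⟩
            exact List.mem_filterMap.mpr ⟨s, List.mem_range'_1.mpr ⟨by omega, by omega⟩, hfb⟩
          refine le_trans ((PySem.List.foldl_min_le _ _).2 _ hmem) ?_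
          rw [← hfa]
          push_cast
          omega

-- ===== VERDICT (by name: the statement is the Claim_ definition above) =====
theorem solve_spec : Claim_equal_solve := by
  intro nums k _
  unfold Spec_solve
  rw [solve_eq_candsA, solve_alt_eq_candsB, cands_min_eq _ _ _]
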